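-- pv_equiv track=rewrite | github.com/Nighteyez07/AdventOfCode | 2025/day06.py | parse_worksheet_cephalopod
-- ===== SOURCE A (Python) =====
-- def parse_worksheet_cephalopod(lines):
--     """Parse the worksheet reading right-to-left in cephalopod math style.
--
--     1. Split by all-space columns to get separate problems
--     2. For each problem, read columns right-to-left
--     3. Each column (top-to-bottom, ignoring spaces) forms one number
--     4. Operator is in the last row
--     """
--     if not lines:
--         return []
--
--     # Find the maximum width
--     max_width = max(len(line) for line in lines)
--
--     # Pad all lines to the same width
--     padded_lines = [line.ljust(max_width) for line in lines]
--
--     # The last line contains operators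
--     operator_line = padded_lines[-1]
--     number_lines = padded_lines[:-1]
--
--     # Find all-space columns (separators)
--     space_columns = []
--     for col in range(max_width):
--         if all(line[col] == ' ' for line in padded_lines):
--             space_columns.append(col)
--
--     # Split into problem ranges based on space columns
--     problem_ranges = []
--     start = 0
--     for space_col in space_columns:
--         if space_col > start:
--             problem_ranges.append((start, space_col))
--         start = space_col + 1
--     # Add the last range
--     if start < max_width:
--         problem_ranges.append((start, max_width))
--
--     # Process each problem
--     problems = []
--     for problem_start, problem_end in problem_ranges:
--         # Find the operator in this range
--         operator = None
--         for c in range(problem_start, problem_end):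
--             if operator_line[c] in ['*', '+']:
--                 operator = operator_line[c]
--                 break
--
--         if not operator:
--             continue
--
--         # Read columns right-to-left within this problem range
--         # Each column (top-to-bottom, ignoring spaces) forms one number
--         numbers = []
--         for col in range(problem_end - 1, problem_start - 1, -1):
--             # Read this column top-to-bottom, collecting digits
--             digits = []
--             for row_idx in range(len(number_lines)):
--                 char = number_lines[row_idx][col]
--                 if char.isdigit():
--                     digits.append(char)
--
--             # If we found digits, form a number
--             if digits:
--                 number = int(''.join(digits))
--                 numbers.append(number)
--
--         if numbers:
--             problems.append((operator, numbers))
--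
--     return problems
-- ===== SOURCE B (Python) =====
-- def _problem_from_group(group):
--     """group: list of non-blank column strings (top-to-bottom, last char = operator row)."""
--     op = next((col[-1] for col in group if col[-1] in '*+'), None)
--     if op is None:
--         return None
--     numbers = []
--     for col in reversed(group):
--         digits = [ch for ch in col[:-1] if ch.isdigit()]
--         if digits:
--             numbers.append(int(''.join(digits)))
--     if not numbers:
--         return None
--     return (op, numbers)
--
--
-- def parse_worksheet_cephalopod(lines):
--     width = max((len(line) for line in lines), default=0)
--     padded = [line.ljust(width) for line in lines]
--     # transpose into column strings
--     cols = [''.join(line[c] for line in padded) for c in range(width)]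
--     problems = []
--     group = []
--     for col in cols + ['']:  # sentinel blank column flushes the last group
--         if any(ch != ' ' for ch in col):
--             group.append(col)
--         else:
--             p = _problem_from_group(group)
--             if p is not None:
--                 problems.append(p)
--             group = []
--     return problems
-- ===== Notes on version B (the rewrite author's own statement) =====
-- stated objective: alternative
-- what changed: B transposes the padded grid into column strings once and splits them into problems as maximal runs of non-blank columns with a single accumulator pass, instead of A's space-column index bookkeeping, range arithmetic and per-range row-by-row character indexing.
import Mathlib
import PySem

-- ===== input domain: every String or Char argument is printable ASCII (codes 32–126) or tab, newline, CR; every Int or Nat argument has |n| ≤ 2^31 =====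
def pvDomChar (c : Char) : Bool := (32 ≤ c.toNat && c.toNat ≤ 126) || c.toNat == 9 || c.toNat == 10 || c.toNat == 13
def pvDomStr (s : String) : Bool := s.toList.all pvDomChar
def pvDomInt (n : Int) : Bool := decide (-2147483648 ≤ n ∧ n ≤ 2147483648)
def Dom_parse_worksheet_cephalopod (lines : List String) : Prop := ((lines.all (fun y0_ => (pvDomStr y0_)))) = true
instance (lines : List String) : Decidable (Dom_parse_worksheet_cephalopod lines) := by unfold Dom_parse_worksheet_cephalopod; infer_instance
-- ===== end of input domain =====

-- B transposes the padded grid into column strings and splits them into maximal runs of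
-- non-blank columns in one accumulator pass (alternative decomposition, same cost as A).

-- int(''.join(digits)) — in both programs `digits` is a nonempty list of ASCII digits,
-- so PySem.Int.ofStr? returns some value and the default is never used
def pvIntOfDigits (ds : List Char) : Int := (PySem.Int.ofStr? (String.mk ds)).getD 0

-- ===== PORT A =====
def parse_worksheet_cephalopod (lines : List String) : List (String × List Int) :=
  if lines = [] then []
  else
    let ls := lines.map String.toList
    -- max(len(line) for line in lines): lines is nonempty and lengths are ≥ 0,
    -- so Python's max equals this fold
    let maxW : Nat := (ls.map List.length).foldl Nat.max 0
    let padded := ls.map (fun l => l ++ List.replicate (maxW - l.length) ' ')  -- line.ljust(max_width)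
    let operatorLine := (padded.getLast?).getD []   -- padded_lines[-1]; padded is nonempty
    let numberLines := padded.dropLast              -- padded_lines[:-1]
    -- all indexing below is in range (every padded line has length maxW), so List.getD is exact
    let spaceColumns := (List.range maxW).foldl (fun acc col =>
        if padded.all (fun line => line.getD col ' ' == ' ') then acc ++ [col] else acc) []
    let st := spaceColumns.foldl (fun (st : List (Nat × Nat) × Nat) spaceCol =>
        (if st.2 < spaceCol then st.1 ++ [(st.2, spaceCol)] else st.1, spaceCol + 1)) ([], 0)
    let problemRanges := if st.2 < maxW then st.1 ++ [(st.2, maxW)] else st.1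
    problemRanges.foldl (fun probs r =>
      -- first c in [r.1, r.2) whose operator-line char is '*' or '+' (the for/break loop)
      match (List.range' r.1 (r.2 - r.1)).find? (fun c =>
          operatorLine.getD c ' ' == '*' || operatorLine.getD c ' ' == '+') with
      | none => probs
      | some c =>
        -- range(problem_end - 1, problem_start - 1, -1)
        let numbers := (List.range' r.1 (r.2 - r.1)).reverse.foldl (fun nums col =>
            let digits := numberLines.foldl (fun ds line =>
                let ch := line.getD col ' '
                if ch.isDigit then ds ++ [ch] else ds) []
            if digits ≠ [] then nums ++ [pvIntOfDigits digits] else nums) []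
        if numbers ≠ [] then probs ++ [(String.mk [operatorLine.getD c ' '], numbers)] else probs) []

-- ===== PORT B =====
-- _problem_from_group: operator = last char of the first column ending in '*'/'+';
-- numbers read from the group's columns right-to-left, digits of col[:-1]
def pvProblemFromGroup (group : List (List Char)) : Option (String × List Int) :=
  match group.find? (fun col => col.getLastD ' ' == '*' || col.getLastD ' ' == '+') with
  | none => none
  | some opcol =>
    let numbers := group.reverse.foldl (fun nums col =>
        let digits := col.dropLast.filter Char.isDigit
        if digits ≠ [] then nums ++ [pvIntOfDigits digits] else nums) []
    if numbers = [] then none else some (String.mk [opcol.getLastD ' '], numbers)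

def parse_worksheet_cephalopod_alt (lines : List String) : List (String × List Int) :=
  let ls := lines.map String.toList
  let width : Nat := (ls.map List.length).foldl Nat.max 0   -- max(..., default=0)
  let padded := ls.map (fun l => l ++ List.replicate (width - l.length) ' ')
  -- transpose: column c, top to bottom (in-range indexing, so List.getD is exact)
  let cols := (List.range width).map (fun c => padded.map (fun line => line.getD c ' '))
  -- one pass with a group accumulator; the trailing blank column flushes the last group
  ((cols ++ [[]]).foldl (fun (st : List (String × List Int) × List (List Char)) (col : List Char) =>
      if col.any (fun ch => ch != ' ') then (st.1, st.2 ++ [col])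
      else match pvProblemFromGroup st.2 with
        | some p => (st.1 ++ [p], [])
        | none => (st.1, [])) ([], [])).1

-- ===== PRECONDITION & SPEC =====
def Spec_parse_worksheet_cephalopod (lines : List String) (out : List (String × List Int)) : Prop := out = parse_worksheet_cephalopod_alt lines
instance (lines : List String) (out : List (String × List Int)) : Decidable (Spec_parse_worksheet_cephalopod lines out) := by unfold Spec_parse_worksheet_cephalopod; infer_instance

-- ===== CLAIM (what is proved, stated in full; the proofs are below) =====
def Claim_equal_parse_worksheet_cephalopod : Prop := ∀ (lines : List String), Dom_parse_worksheet_cephalopod lines → Spec_parse_worksheet_cephalopod lines (parse_worksheet_cephalopod lines)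

-- ===== LEMMAS AND PROOFS =====

-- the column of P at index c, top to bottom
def pvColAt (P : List (List Char)) (c : Nat) : List Char := P.map (fun line => line.getD c ' ')

-- a blank column
def pvSpB (col : List Char) : Bool := col.all (fun ch => ch == ' ')

-- split a list at the elements satisfying p (the separators are dropped);
-- always returns a nonempty list of (possibly empty) groups
def pvSplit {α : Type} (p : α → Bool) : List α → List (List α)
  | [] => [[]]
  | a :: l => if p a then [] :: pvSplit p l else (pvSplit p l).modifyHead (a :: ·)

def pvSlice (r : Nat × Nat) : List Nat := List.range' r.1 (r.2 - r.1)

-- A's per-range body as an Option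
def pvProcA (opLine : List Char) (numLines : List (List Char)) (r : Nat × Nat) :
    Option (String × List Int) :=
  match (List.range' r.1 (r.2 - r.1)).find? (fun c =>
      opLine.getD c ' ' == '*' || opLine.getD c ' ' == '+') with
  | none => none
  | some c =>
    let numbers := (List.range' r.1 (r.2 - r.1)).reverse.foldl (fun nums col =>
        let digits := numLines.foldl (fun ds line =>
            let ch := line.getD col ' '
            if ch.isDigit then ds ++ [ch] else ds) []
        if digits ≠ [] then nums ++ [pvIntOfDigits digits] else nums) []
    if numbers ≠ [] then some (String.mk [opLine.getD c ' '], numbers) else none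

-- A's ranges-builder step
def pvRStep (st : List (Nat × Nat) × Nat) (sc : Nat) : List (Nat × Nat) × Nat :=
  (if st.2 < sc then st.1 ++ [(st.2, sc)] else st.1, sc + 1)

def pvRangesA (t s m : Nat) (sp : Nat → Bool) : List (Nat × Nat) :=
  let st := ((List.range' s m).filter sp).foldl pvRStep ([], t)
  if st.2 < s + m then st.1 ++ [(st.2, s + m)] else st.1

lemma pv_modifyHead_comp {α : Type} (f g : α → α) (l : List α) :
    (l.modifyHead g).modifyHead f = l.modifyHead (fun x => f (g x)) := by
  cases l <;> simp

lemma pv_modifyHead_nil_append {α : Type} (l : List (List α)) :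
    l.modifyHead (fun x => [] ++ x) = l := by
  cases l <;> simp

lemma pv_foldl_opt {α β : Type} (f : α → Option β) (l : List α) :
    ∀ acc : List β, l.foldl (fun a x => a ++ (f x).toList) acc = acc ++ l.filterMap f := by
  induction l with
  | nil => simp
  | cons x l ih =>
    intro acc
    cases hfx : f x <;> simp [List.filterMap_cons, hfx, ih]

lemma pv_split_map {α β : Type} (p : β → Bool) (f : α → β) (l : List α) :
    pvSplit p (l.map f) = (pvSplit (fun a => p (f a)) l).map (List.map f) := by
  induction l with
  | nil => simp [pvSplit]
  | cons a l ih =>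
    by_cases h : p (f a)
    · simp [pvSplit, h, ih]
    · simp only [List.map_cons, pvSplit, h, if_neg, ih, Bool.false_eq_true, if_false]
      cases hsp : pvSplit (fun a => p (f a)) l <;> simp

lemma pv_filterMap_filter_ne_nil {α β : Type} (g : List α → Option β) (hg : g [] = none)
    (L : List (List α)) :
    (L.filter (fun l => !l.isEmpty)).filterMap g = L.filterMap g := by
  induction L with
  | nil => simp
  | cons l L ih =>
    by_cases h : l = []
    · subst h; simp [List.filterMap_cons, hg, ih]
    · simp [List.filter_cons, List.isEmpty_iff, h, List.filterMap_cons, ih]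

lemma pv_rfold_acc (l : List Nat) :
    ∀ (acc : List (Nat × Nat)) (t : Nat),
      l.foldl pvRStep (acc, t)
        = (acc ++ (l.foldl pvRStep ([], t)).1, (l.foldl pvRStep ([], t)).2) := by
  induction l with
  | nil => simp
  | cons sc l ih =>
    intro acc t
    simp only [List.foldl_cons, pvRStep]
    by_cases h : t < sc
    · rw [if_pos h, if_pos h]
      simp only [List.nil_append]
      rw [ih (acc ++ [(t, sc)]) (sc + 1), ih [(t, sc)] (sc + 1)]
      simp
    · rw [if_neg h, if_neg h]
      exact ih acc (sc + 1)

lemma pv_ranges_core (sp : Nat → Bool) :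
    ∀ (m s t : Nat), t ≤ s →
      (pvRangesA t s m sp).map pvSlice
        = ((pvSplit sp (List.range' s m)).modifyHead
            (fun g => List.range' t (s - t) ++ g)).filter (fun l => !l.isEmpty) := by
  intro m
  induction m with
  | zero =>
    intro s t ht
    by_cases h : t < s
    · have hne : List.range' t (s - t) ≠ [] := by
        simp [List.range'_eq_nil_iff]; omega
      simp [pvRangesA, pvSplit, pvSlice, h, List.filter_cons, List.isEmpty_iff, hne]
    · have : s - t = 0 := by omega
      simp [pvRangesA, pvSplit, h, List.filter_cons, this]
  | succ m ih =>
    intro s t ht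
    have hr : List.range' s (m + 1) = s :: List.range' (s + 1) m := by
      rw [List.range'_succ]
    by_cases hsp : sp s = true
    · -- column s is a separator
      have lhs : pvRangesA t s (m + 1) sp
          = (if t < s then [(t, s)] else []) ++ pvRangesA (s + 1) (s + 1) m sp := by
        simp only [pvRangesA, hr, List.filter_cons, hsp, if_true, List.foldl_cons, pvRStep]
        rw [pv_rfold_acc]
        by_cases h : t < s
        · simp only [h, if_true]
          have : s + (m + 1) = (s + 1) + m := by omega
          rw [this]
          split <;> simp
        · simp only [h, if_false]
          have : s + (m + 1) = (s + 1) + m := by omega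
          rw [this]
          split <;> simp
      rw [lhs]
      have ihr := ih (s + 1) (s + 1) (le_refl _)
      simp only [Nat.sub_self, List.range'_zero] at ihr
      rw [pv_modifyHead_nil_append] at ihr
      simp only [List.map_append, ihr, hr, pvSplit, hsp, if_true, List.modifyHead_cons,
        List.append_nil, List.filter_cons]
      by_cases h : t < s
      · have hne : List.range' t (s - t) ≠ [] := by
          simp [List.range'_eq_nil_iff]; omega
        simp [List.isEmpty_iff, hne, pvSlice, h]
      · have : s - t = 0 := by omega
        simp [this, h]
    · -- column s belongs to a problem
      have hspf : sp s = false := by simpa using hsp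
      have lhs : pvRangesA t s (m + 1) sp = pvRangesA t (s + 1) m sp := by
        have h2 : s + (m + 1) = (s + 1) + m := by omega
        simp [pvRangesA, hr, List.filter_cons, hspf, h2]
      rw [lhs, ih (s + 1) t (by omega)]
      simp only [hr, pvSplit, hspf, Bool.false_eq_true, if_false]
      rw [pv_modifyHead_comp]
      congr 1
      congr 1
      funext g
      have h1 : s + 1 - t = (s - t) + 1 := by omega
      have h2 : List.range' t ((s - t) + 1) = List.range' t (s - t) ++ [s] := by
        rw [List.range'_concat]
        congr 2
        omega
      rw [h1, h2]
      simp

lemma pv_colAt_getLast (P : List (List Char)) (c : Nat) (hP : P ≠ []) :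
    (pvColAt P c).getLastD ' ' = ((P.getLast?).getD []).getD c ' ' := by
  rcases List.eq_nil_or_concat P with h | ⟨l', a, rfl⟩
  · exact absurd h hP
  · simp [pvColAt, List.getLastD_concat, List.getLast?_concat]

lemma pv_colAt_dropLast (P : List (List Char)) (c : Nat) :
    (pvColAt P c).dropLast = pvColAt P.dropLast c := by
  simp [pvColAt, List.map_dropLast]

lemma pv_colAt_all (P : List (List Char)) (c : Nat) :
    pvSpB (pvColAt P c) = P.all (fun line => line.getD c ' ' == ' ') := by
  simp [pvSpB, pvColAt, List.all_map]
  rfl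

lemma pv_any_ne_space (col : List Char) :
    col.any (fun ch => ch != ' ') = !pvSpB col := by
  simp [pvSpB, List.all_eq_not_any_not, bne]

lemma pv_digits_col (N : List (List Char)) (col : Nat) :
    N.foldl (fun ds line =>
        let ch := line.getD col ' '
        if ch.isDigit then ds ++ [ch] else ds) []
      = (pvColAt N col).filter Char.isDigit := by
  have h := PySem.List.foldl_append_if_eq_filter (p := Char.isDigit)
    (l := pvColAt N col) (acc := ([] : List Char))
  rw [pvColAt, List.foldl_map] at h
  simpa using h

lemma pv_numbers_eq (P : List (List Char)) (idxs : List Nat) :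
    ∀ nums : List Int,
      (idxs.map (pvColAt P)).foldl (fun nums col =>
          let digits := col.dropLast.filter Char.isDigit
          if digits ≠ [] then nums ++ [pvIntOfDigits digits] else nums) nums
        = idxs.foldl (fun nums col =>
            let digits := P.dropLast.foldl (fun ds line =>
                let ch := line.getD col ' '
                if ch.isDigit then ds ++ [ch] else ds) []
            if digits ≠ [] then nums ++ [pvIntOfDigits digits] else nums) nums := by
  induction idxs with
  | nil => intro nums; rfl
  | cons i idxs ih =>
    intro nums
    simp only [List.map_cons, List.foldl_cons]
    rw [ih]
    congr 1
    rw [pv_colAt_dropLast, ← pv_digits_col]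

lemma pv_procA_eq (P : List (List Char)) (hP : P ≠ []) (r : Nat × Nat) :
    pvProcA ((P.getLast?).getD []) P.dropLast r
      = pvProblemFromGroup ((pvSlice r).map (pvColAt P)) := by
  have hpred : ((fun col : List Char => col.getLastD ' ' == '*' || col.getLastD ' ' == '+')
      ∘ pvColAt P)
      = fun c => ((P.getLast?).getD []).getD c ' ' == '*'
          || ((P.getLast?).getD []).getD c ' ' == '+' := by
    funext c
    simp only [Function.comp_apply, pv_colAt_getLast P c hP]
  unfold pvProcA pvProblemFromGroup
  simp only [pvSlice]
  rw [List.find?_map, hpred]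
  cases hf : (List.range' r.1 (r.2 - r.1)).find? (fun c =>
      ((P.getLast?).getD []).getD c ' ' == '*'
        || ((P.getLast?).getD []).getD c ' ' == '+') with
  | none => rfl
  | some c =>
    simp only [Option.map_some]
    rw [← List.map_reverse, pv_numbers_eq, pv_colAt_getLast P c hP]
    by_cases hn : (List.range' r.1 (r.2 - r.1)).reverse.foldl (fun nums col =>
        let digits := P.dropLast.foldl (fun ds line =>
            let ch := line.getD col ' '
            if ch.isDigit then ds ++ [ch] else ds) []
        if digits ≠ [] then nums ++ [pvIntOfDigits digits] else nums) [] = []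
    · simp [hn]
    · simp [hn]

-- B's fold step
def pvBStep (st : List (String × List Int) × List (List Char)) (col : List Char) :
    List (String × List Int) × List (List Char) :=
  if col.any (fun ch => ch != ' ') then (st.1, st.2 ++ [col])
  else match pvProblemFromGroup st.2 with
    | some p => (st.1 ++ [p], [])
    | none => (st.1, [])

lemma pv_foldB (cols : List (List Char)) :
    ∀ (probs : List (String × List Int)) (group : List (List Char)),
      ((cols ++ [[]]).foldl pvBStep (probs, group)).1
        = probs ++ ((pvSplit pvSpB cols).modifyHead
            (fun g => group ++ g)).filterMap pvProblemFromGroup := by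
  induction cols with
  | nil =>
    intro probs group
    simp only [List.nil_append, List.foldl_cons, List.foldl_nil, pvBStep, List.any_nil,
      Bool.false_eq_true, if_false, pvSplit, List.modifyHead_cons, List.append_nil]
    cases h : pvProblemFromGroup group <;> simp [h, List.filterMap_cons]
  | cons c cs ih =>
    intro probs group
    simp only [List.cons_append, List.foldl_cons, pvBStep, pv_any_ne_space]
    by_cases h : pvSpB c
    · simp only [h, Bool.not_true, Bool.false_eq_true, if_false]
      cases hg : pvProblemFromGroup group with
      | none =>
        rw [ih]
        simp only [pvSplit, h, if_true, List.modifyHead_cons, List.filterMap_cons, hg]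
        rw [pv_modifyHead_nil_append]
        simp [hg]
      | some p =>
        rw [ih]
        simp only [pvSplit, h, if_true, List.modifyHead_cons, List.filterMap_cons, hg]
        rw [pv_modifyHead_nil_append]
        simp [hg]
    · simp only [h, Bool.not_false, if_true]
      rw [ih]
      simp only [pvSplit, h, Bool.false_eq_true, if_false]
      rw [pv_modifyHead_comp]
      congr 3
      funext g
      simp

lemma pv_filterMap_map' {α β γ : Type} (g : β → Option γ) (f : α → β) (l : List α) :
    l.filterMap (fun x => g (f x)) = (l.map f).filterMap g := by
  rw [List.filterMap_map]
  rfl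

lemma pv_rangesA_zero (w : Nat) (sp : Nat → Bool) :
    pvRangesA 0 0 w sp
      = (if (((List.range w).filter sp).foldl pvRStep ([], 0)).2 < w
         then (((List.range w).filter sp).foldl pvRStep ([], 0)).1
            ++ [((((List.range w).filter sp).foldl pvRStep ([], 0)).2, w)]
         else (((List.range w).filter sp).foldl pvRStep ([], 0)).1) := by
  simp [pvRangesA, List.range_eq_range', Nat.zero_add]

-- the A side, after its three shared lets, equals the split/filterMap normal form
lemma pv_A_side (P : List (List Char)) (w : Nat) (hP : P ≠ []) :
    (let operatorLine := (P.getLast?).getD []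
     let numberLines := P.dropLast
     let spaceColumns := (List.range w).foldl (fun acc col =>
        if P.all (fun line => line.getD col ' ' == ' ') then acc ++ [col] else acc) []
     let st := spaceColumns.foldl (fun (st : List (Nat × Nat) × Nat) spaceCol =>
        (if st.2 < spaceCol then st.1 ++ [(st.2, spaceCol)] else st.1, spaceCol + 1)) ([], 0)
     let problemRanges := if st.2 < w then st.1 ++ [(st.2, w)] else st.1
     problemRanges.foldl (fun probs r =>
       match (List.range' r.1 (r.2 - r.1)).find? (fun c =>
           operatorLine.getD c ' ' == '*' || operatorLine.getD c ' ' == '+') with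
       | none => probs
       | some c =>
         let numbers := (List.range' r.1 (r.2 - r.1)).reverse.foldl (fun nums col =>
             let digits := numberLines.foldl (fun ds line =>
                 let ch := line.getD col ' '
                 if ch.isDigit then ds ++ [ch] else ds) []
             if digits ≠ [] then nums ++ [pvIntOfDigits digits] else nums) []
         if numbers ≠ [] then probs ++ [(String.mk [operatorLine.getD c ' '], numbers)]
         else probs) [])
    = List.filterMap pvProblemFromGroup (pvSplit pvSpB ((List.range w).map (pvColAt P))) := by
  simp only []
  rw [PySem.List.foldl_append_if_eq_filter, List.nil_append]
  rw [show (fun col => P.all (fun line => line.getD col ' ' == ' '))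
      = (fun c => pvSpB (pvColAt P c)) by funext c; rw [pv_colAt_all]]
  rw [show (fun (st : List (Nat × Nat) × Nat) (spaceCol : Nat) =>
      (if st.2 < spaceCol then st.1 ++ [(st.2, spaceCol)] else st.1, spaceCol + 1)) = pvRStep
      from rfl]
  rw [show (fun (probs : List (String × List Int)) (r : Nat × Nat) =>
      match (List.range' r.1 (r.2 - r.1)).find? (fun c =>
          ((P.getLast?).getD []).getD c ' ' == '*' || ((P.getLast?).getD []).getD c ' ' == '+') with
      | none => probs
      | some c =>
        let numbers := (List.range' r.1 (r.2 - r.1)).reverse.foldl (fun nums col =>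
            let digits := P.dropLast.foldl (fun ds line =>
                let ch := line.getD col ' '
                if ch.isDigit then ds ++ [ch] else ds) []
            if digits ≠ [] then nums ++ [pvIntOfDigits digits] else nums) []
        if numbers ≠ [] then probs ++ [(String.mk [((P.getLast?).getD []).getD c ' '], numbers)]
        else probs)
      = (fun probs r => probs ++ (pvProcA ((P.getLast?).getD []) P.dropLast r).toList) by
    funext probs r
    unfold pvProcA
    cases hf : (List.range' r.1 (r.2 - r.1)).find? (fun c =>
        ((P.getLast?).getD []).getD c ' ' == '*' || ((P.getLast?).getD []).getD c ' ' == '+') with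
    | none => simp
    | some c =>
      dsimp only
      by_cases hn : ((List.range' r.1 (r.2 - r.1)).reverse.foldl (fun nums col =>
          let digits := P.dropLast.foldl (fun ds line =>
              let ch := line.getD col ' '
              if ch.isDigit then ds ++ [ch] else ds) []
          if digits ≠ [] then nums ++ [pvIntOfDigits digits] else nums) [] : List Int) = []
      · rw [if_neg (fun k => k hn), if_neg (fun k => k hn)]
        simp
      · rw [if_pos hn, if_pos hn]
        simp]
  rw [pv_foldl_opt, List.nil_append]
  rw [show pvProcA ((P.getLast?).getD []) P.dropLast
      = (fun r => pvProblemFromGroup ((pvSlice r).map (pvColAt P))) by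
    funext r; exact pv_procA_eq P hP r]
  rw [pv_filterMap_map' (fun g => pvProblemFromGroup (g.map (pvColAt P))) pvSlice]
  rw [← pv_rangesA_zero, pv_ranges_core (fun c => pvSpB (pvColAt P c)) w 0 0 (le_refl 0)]
  simp only [Nat.sub_self, List.range'_zero]
  rw [pv_modifyHead_nil_append]
  rw [pv_filterMap_filter_ne_nil _ rfl]
  rw [pv_filterMap_map' pvProblemFromGroup (List.map (pvColAt P))]
  rw [← pv_split_map, ← List.range_eq_range']

lemma pv_B_side (P : List (List Char)) (w : Nat) :
    ((((List.range w).map (fun c => P.map (fun (line : List Char) => line.getD c ' '))) ++ [[]]).foldl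
        (fun (st : List (String × List Int) × List (List Char)) (col : List Char) =>
          if col.any (fun ch => ch != ' ') then (st.1, st.2 ++ [col])
          else match pvProblemFromGroup st.2 with
            | some p => (st.1 ++ [p], [])
            | none => (st.1, [])) ([], [])).1
      = List.filterMap pvProblemFromGroup (pvSplit pvSpB ((List.range w).map (pvColAt P))) := by
  rw [show (fun (st : List (String × List Int) × List (List Char)) (col : List Char) =>
      if col.any (fun ch => ch != ' ') then (st.1, st.2 ++ [col])
      else match pvProblemFromGroup st.2 with
        | some p => (st.1 ++ [p], [])
        | none => (st.1, [])) = pvBStep from rfl]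
  rw [show (fun c => P.map (fun line => line.getD c ' ')) = pvColAt P from rfl]
  rw [pv_foldB, pv_modifyHead_nil_append, List.nil_append]

-- ===== VERDICT (by name: the statement is the Claim_ definition above) =====
theorem parse_worksheet_cephalopod_spec : Claim_equal_parse_worksheet_cephalopod := by
  intro lines _hdom
  unfold Spec_parse_worksheet_cephalopod
  by_cases hl : lines = []
  · subst hl; rfl
  · have hP : (lines.map String.toList).map (fun l =>
        l ++ List.replicate ((((lines.map String.toList).map List.length).foldl Nat.max 0)
          - l.length) ' ') ≠ [] := by
      intro h
      apply hl
      simpa using h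
    show parse_worksheet_cephalopod lines = parse_worksheet_cephalopod_alt lines
    unfold parse_worksheet_cephalopod parse_worksheet_cephalopod_alt
    rw [if_neg hl]
    exact (pv_A_side _ _ hP).trans (pv_B_side _ _).symm
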